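-- pv_equiv track=rewrite | github.com/AlifSrSE/ProblemSolves | 2007B-indexAndMaximumValue.py | solve
-- ===== SOURCE A (Python) =====
-- def solve(a, c, l, r):
--     max_val = max(a)
--     result = []
--     for i in range(len(c)):
--         if l[i] <= max_val <= r[i]:
--             if c[i] == '+':
--                 max_val += 1
--             else:
--                 max_val -= 1
--         result.append(str(max_val))
--     return ' '.join(result)
-- ===== SOURCE B (Python) =====
-- def _run(cur, t):
--     # returns (' '-joined values produced by applying the ops in t starting at cur, final value)
--     if len(t) == 0:
--         return '', cur
--     if len(t) == 1:
--         op, lo, hi = t[0]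
--         nxt = cur + ((1 if op == '+' else -1) if lo <= cur <= hi else 0)
--         return str(nxt), nxt
--     mid = len(t) // 2
--     ls, m = _run(cur, t[:mid])
--     rs, f = _run(m, t[mid:])
--     return ls + ' ' + rs, f
--
--
-- def solve(a, c, l, r):
--     return _run(max(a), list(zip(c, l, r)))[0]
-- ===== Notes on version B (the rewrite author's own statement) =====
-- stated objective: alternative
-- what changed: A's left-to-right indexed loop mutating max_val and appending strings is replaced by a divide-and-conquer recursion over zip(c,l,r): each half returns (its space-joined rendered values, its exit value) and the halves are composed, exploiting that each operation is a state transformer so the sequence splits at any point.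
-- outside the precondition, e.g. on solve([0], ['+'], [5], []): A returns '0', B returns ''
import Mathlib
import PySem

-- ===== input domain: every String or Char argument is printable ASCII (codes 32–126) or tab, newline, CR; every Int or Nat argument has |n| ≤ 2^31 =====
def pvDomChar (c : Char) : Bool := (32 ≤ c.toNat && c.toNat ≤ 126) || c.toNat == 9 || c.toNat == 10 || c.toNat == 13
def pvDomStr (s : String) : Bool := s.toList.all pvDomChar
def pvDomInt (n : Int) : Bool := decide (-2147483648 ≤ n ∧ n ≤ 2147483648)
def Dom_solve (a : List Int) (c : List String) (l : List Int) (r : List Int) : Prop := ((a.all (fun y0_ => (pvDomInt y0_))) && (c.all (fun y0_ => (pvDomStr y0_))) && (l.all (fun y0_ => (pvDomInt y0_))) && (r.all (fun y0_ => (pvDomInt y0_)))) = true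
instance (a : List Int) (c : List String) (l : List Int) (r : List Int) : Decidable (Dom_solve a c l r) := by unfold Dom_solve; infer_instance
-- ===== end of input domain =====

-- B replaces A's left-to-right indexed accumulator loop by a divide-and-conquer recursion: the
-- operation sequence is split in halves, each half returns (its rendered output, its exit value),
-- and the two halves are composed — a different decomposition of the same O(n) work.

-- ===== PORT A =====
-- one iteration of A's for-loop (state = (max_val, result)); condition and branches in A's order
def stepA (c : List String) (l r : List Int) (s : Int × List String) (i : Int) : Int × List String :=
  let mv := if PySem.List.pyGetD l i 0 ≤ s.1 ∧ s.1 ≤ PySem.List.pyGetD r i 0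
            then (if PySem.List.pyGetD c i "" = "+" then s.1 + 1 else s.1 - 1) else s.1
  (mv, s.2 ++ [PySem.Int.toStr mv])

def solve (a : List Int) (c : List String) (l : List Int) (r : List Int) : String :=
  let maxVal := (PySem.List.max? a (fun x => x)).getD 0   -- max(a); Pre_ demands a ≠ []
  let st := (PySem.List.pyRange 0 (c.length : Int) 1).foldl (stepA c l r) (maxVal, [])
  PySem.Str.join " " st.2

-- ===== PORT B =====
-- Source B's _run: divide and conquer on the list of (op, lo, hi) triples;
-- returns (space-joined rendered values, final value)
def runB (cur : Int) (t : List (String × Int × Int)) : String × Int :=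
  match t with
  | [] => ("", cur)
  | [(op, lo, hi)] =>
      let nxt := cur + (if lo ≤ cur ∧ cur ≤ hi then (if op = "+" then 1 else -1) else 0)
      (PySem.Int.toStr nxt, nxt)
  | x :: y :: rest =>
      let t' := x :: y :: rest
      let mid := t'.length / 2
      let p := runB cur (t'.take mid)
      let q := runB p.2 (t'.drop mid)
      (p.1 ++ " " ++ q.1, q.2)
  termination_by t.length
  decreasing_by
  · simp [List.length_take]; omega
  · simp; omega

def solve_alt (a : List Int) (c : List String) (l : List Int) (r : List Int) : String :=
  (runB ((PySem.List.max? a (fun x => x)).getD 0) (c.zip (l.zip r))).1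

-- ===== PRECONDITION & SPEC =====
-- Pre_ excludes inputs on which Python A raises (max([]) on empty a; l[i] when l is shorter than c)
-- and inputs with r shorter than c, where A either raises on r[i] or finishes only because the
-- chained comparison short-circuits past r[i] — an accident of evaluation order, not a specified value.
def Pre_solve (a : List Int) (c : List String) (l : List Int) (r : List Int) : Prop :=
  a ≠ [] ∧ c.length ≤ l.length ∧ c.length ≤ r.length
instance (a : List Int) (c : List String) (l : List Int) (r : List Int) : Decidable (Pre_solve a c l r) := by unfold Pre_solve; infer_instance
def pvWitness_solve : List Int × List String × List Int × List Int :=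
  ([3, 1], ["+", "-", "x"], [2, 0, 4], [5, 9, 9])

def Spec_solve (a : List Int) (c : List String) (l : List Int) (r : List Int) (out : String) : Prop := out = solve_alt a c l r
instance (a : List Int) (c : List String) (l : List Int) (r : List Int) (out : String) : Decidable (Spec_solve a c l r out) := by unfold Spec_solve; infer_instance

-- ===== CLAIM (what is proved, stated in full; the proofs are below) =====
def Claim_equal_solve : Prop := ∀ (a : List Int) (c : List String) (l : List Int) (r : List Int), Dom_solve a c l r → Pre_solve a c l r → Spec_solve a c l r (solve a c l r)

-- ===== LEMMAS AND PROOFS =====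

-- the state update both programs implement, and the list of successive values it produces
def stepS (cur : Int) (x : String × Int × Int) : Int :=
  cur + (if x.2.1 ≤ cur ∧ cur ≤ x.2.2 then (if x.1 = "+" then 1 else -1) else 0)

def valsS : Int → List (String × Int × Int) → List Int
  | _, [] => []
  | cur, x :: t => stepS cur x :: valsS (stepS cur x) t

theorem valsS_ne_nil (cur : Int) (t : List (String × Int × Int)) (h : t ≠ []) :
    valsS cur t ≠ [] := by
  cases t with
  | nil => exact absurd rfl h
  | cons x t => simp [valsS]

theorem valsS_append (u v : List (String × Int × Int)) :
    ∀ cur, valsS cur (u ++ v) = valsS cur u ++ valsS (u.foldl stepS cur) v := by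
  induction u with
  | nil => intro cur; simp [valsS]
  | cons x u ih => intro cur; simp [valsS, ih]

-- ' '.join of a two-or-more-element list peels off its head
theorem join_cc (a b : String) (rest : List String) :
    PySem.Str.join " " (a :: b :: rest) = a ++ " " ++ PySem.Str.join " " (b :: rest) := by
  simp only [PySem.Str.join, List.map_cons]
  rw [show (" ".toList) = [' '] from rfl, PySem.Chars.join_cons_cons,
    String.ofList_append, String.ofList_append]
  simp [String.append_assoc]

-- ' '.join splits across a concatenation of nonempty lists
theorem join_split (xs ys : List String) (hx : xs ≠ []) (hy : ys ≠ []) :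
    PySem.Str.join " " (xs ++ ys) = PySem.Str.join " " xs ++ " " ++ PySem.Str.join " " ys := by
  induction xs with
  | nil => exact absurd rfl hx
  | cons x xs ih =>
    cases xs with
    | nil =>
      cases ys with
      | nil => exact absurd rfl hy
      | cons y ys =>
        rw [List.singleton_append, join_cc]
        simp [PySem.Str.join]
    | cons x' xs' =>
      have h := ih (by simp)
      simp only [List.cons_append] at h ⊢
      rw [join_cc, join_cc x x' xs', h]
      simp [String.append_assoc]

-- runB computes (join of the rendered value list, the folded final value)
theorem runB_eq (cur : Int) (t : List (String × Int × Int)) :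
    runB cur t = (PySem.Str.join " " ((valsS cur t).map PySem.Int.toStr), t.foldl stepS cur) := by
  fun_induction runB cur t with
  | case1 cur => simp [valsS, PySem.Str.join]
  | case2 cur op lo hi =>
    simp [valsS, stepS, PySem.Str.join, PySem.Int.toStr]
    exact ⟨rfl, rfl⟩
  | case3 cur x y rest t' mid p q ih1 ih2 ih3 =>
    have hsplit : (x :: y :: rest).take ((x :: y :: rest).length / 2)
        ++ (x :: y :: rest).drop ((x :: y :: rest).length / 2) = x :: y :: rest :=
      List.take_append_drop _ _
    have hp : p = (PySem.Str.join " "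
          ((valsS cur ((x :: y :: rest).take ((x :: y :: rest).length / 2))).map PySem.Int.toStr),
        ((x :: y :: rest).take ((x :: y :: rest).length / 2)).foldl stepS cur) := ih2
    have hq : q = (PySem.Str.join " "
          ((valsS p.2 ((x :: y :: rest).drop ((x :: y :: rest).length / 2))).map PySem.Int.toStr),
        ((x :: y :: rest).drop ((x :: y :: rest).length / 2)).foldl stepS p.2) := ih3
    rw [hp] at hq
    simp only at hq
    refine Prod.ext ?_ ?_
    · show p.1 ++ " " ++ q.1 = _
      rw [hp, hq]
      simp only
      conv_rhs => rw [← hsplit]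
      have hu : (x :: y :: rest).take ((x :: y :: rest).length / 2) ≠ [] := by
        simp [List.take_eq_nil_iff]
      have hv : (x :: y :: rest).drop ((x :: y :: rest).length / 2) ≠ [] := by
        simp; omega
      rw [valsS_append, List.map_append,
        join_split _ _
          (by simpa [ne_eq, List.map_eq_nil_iff] using valsS_ne_nil cur _ hu)
          (by simpa [ne_eq, List.map_eq_nil_iff] using valsS_ne_nil _ _ hv)]
    · show q.2 = _
      rw [hq]
      simp only
      conv_rhs => rw [← hsplit]
      rw [List.foldl_append]

-- A's loop body at index k+1 on cons-lists is the body at index k on the tails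
theorem stepA_shift (x : String) (c : List String) (y : Int) (l : List Int) (z : Int)
    (r : List Int) (s : Int × List String) (k : Nat) :
    stepA (x :: c) (y :: l) (z :: r) s ((k + 1 : Nat) : Int) = stepA c l r s (k : Int) := by
  simp only [stepA, PySem.List.pyGetD_natCast, List.getD_cons_succ]

-- core invariant: A's indexed loop appends exactly the rendered value list
theorem loopA_eq : ∀ (c : List String) (l r : List Int),
    c.length ≤ l.length → c.length ≤ r.length → ∀ (m : Int) (res : List String),
    ((List.range c.length).foldl (fun s (k : Nat) => stepA c l r s (k : Int)) (m, res)).2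
      = res ++ (valsS m (c.zip (l.zip r))).map PySem.Int.toStr := by
  intro c
  induction c with
  | nil => intro l r _ _ m res; simp [valsS]
  | cons x c ih =>
    intro l r hl hr m res
    cases l with
    | nil => simp at hl
    | cons y l =>
      cases r with
      | nil => simp at hr
      | cons z r =>
        simp only [List.length_cons, List.range_succ_eq_map, List.foldl_cons, List.foldl_map]
        have h0 : stepA (x :: c) (y :: l) (z :: r) (m, res) ((0 : Nat) : Int)
            = (stepS m (x, y, z), res ++ [PySem.Int.toStr (stepS m (x, y, z))]) := by
          simp only [stepA, stepS, PySem.List.pyGetD_natCast, List.getD_cons_zero]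
          have hv : (if y ≤ m ∧ m ≤ z then if x = "+" then m + 1 else m - 1 else m)
              = m + if y ≤ m ∧ m ≤ z then (if x = "+" then 1 else -1) else 0 := by
            split_ifs <;> ring
          rw [hv]
        rw [h0]
        have hfun : (fun (s : Int × List String) (k : Nat) =>
              stepA (x :: c) (y :: l) (z :: r) s ((k + 1 : Nat) : Int))
            = (fun (s : Int × List String) (k : Nat) => stepA c l r s (k : Int)) := by
          funext s k; exact stepA_shift x c y l z r s k
        rw [hfun, ih l r (by simpa using hl) (by simpa using hr)
              (stepS m (x, y, z)) (res ++ [PySem.Int.toStr (stepS m (x, y, z))])]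
        simp [valsS]

-- ===== VERDICT (by name: the statement is the Claim_ definition above) =====
theorem solve_spec : Claim_equal_solve := by
  intro a c l r _ hpre
  unfold Spec_solve solve solve_alt
  simp only [PySem.List.pyRange_one, Int.sub_zero, Int.toNat_natCast, zero_add, List.foldl_map]
  rw [loopA_eq c l r hpre.2.1 hpre.2.2 ((PySem.List.max? a (fun x => x)).getD 0) [], runB_eq]
  simp
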